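-- pv_equiv track=rewrite | github.com/tarkyaio/tarka | agent/image_pull.py | classify_pull_error
-- ===== SOURCE A (Python) =====
-- from typing import Any, Dict, Optional, Tuple
--
-- def classify_pull_error(msg: str) -> Tuple[str, str]:
--     """
--     Map an error message into a stable bucket for deterministic next steps.
--     Returns: (bucket, evidence_snippet)
--     """
--     s = (msg or "").strip()
--     sl = s.lower()
--
--     # Not found / tag missing / repo missing
--     if "notfound" in sl or "404" in sl or "manifest unknown" in sl:
--         return "not_found", s[:220]
--
--     # Auth / permissions
--     if any(
--         x in sl for x in ("unauthorized", "authentication required", "denied", "forbidden", "no basic auth credentials")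
--     ):
--         return "auth", s[:220]
--
--     # TLS/certs
--     if any(x in sl for x in ("x509", "certificate", "tls handshake", "unknown authority")):
--         return "tls", s[:220]
--
--     # Network reachability / DNS
--     if any(
--         x in sl
--         for x in ("i/o timeout", "context deadline", "no such host", "dial tcp", "connection refused", "timed out")
--     ):
--         return "network", s[:220]
--
--     return "unknown", s[:220]
-- ===== SOURCE B (Python) =====
-- _PRIORITY = (
--     ("notfound", 0), ("404", 0), ("manifest unknown", 0),
--     ("unauthorized", 1), ("authentication required", 1), ("denied", 1),
--     ("forbidden", 1), ("no basic auth credentials", 1),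
--     ("x509", 2), ("certificate", 2), ("tls handshake", 2), ("unknown authority", 2),
--     ("i/o timeout", 3), ("context deadline", 3), ("no such host", 3),
--     ("dial tcp", 3), ("connection refused", 3), ("timed out", 3),
-- )
-- _BUCKETS = ("not_found", "auth", "tls", "network")
--
--
-- def classify_pull_error(msg):
--     s = (msg or "").strip()
--     sl = s.lower()
--     hits = [pri for pat, pri in _PRIORITY if pat in sl]
--     bucket = _BUCKETS[min(hits)] if hits else "unknown"
--     return bucket, s[:220]
-- ===== Notes on version B (the rewrite author's own statement) =====
-- stated objective: alternative
-- what changed: A's early-return if-chain of per-bucket substring groups is replaced by an aggregation: one flat (pattern, priority) table is scanned once collecting the priorities of ALL matching patterns, and the answer is the bucket of the minimum priority (or 'unknown' if none matched).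
import Mathlib
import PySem

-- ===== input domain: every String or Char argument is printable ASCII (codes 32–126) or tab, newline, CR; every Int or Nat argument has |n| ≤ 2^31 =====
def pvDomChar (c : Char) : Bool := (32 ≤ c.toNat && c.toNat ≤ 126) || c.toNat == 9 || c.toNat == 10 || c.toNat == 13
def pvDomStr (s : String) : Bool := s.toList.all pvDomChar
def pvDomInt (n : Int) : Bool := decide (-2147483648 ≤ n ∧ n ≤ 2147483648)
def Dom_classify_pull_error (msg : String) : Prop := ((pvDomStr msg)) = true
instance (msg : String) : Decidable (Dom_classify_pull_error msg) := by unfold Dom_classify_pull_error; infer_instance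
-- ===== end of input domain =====

-- B replaces A's early-return if-chain by an aggregation: collect the priorities of ALL
-- matching patterns from one flat (pattern, priority) table, then pick the bucket of the
-- minimum priority (return value only; neither program has side effects).

-- ===== PORT A =====
def classify_pull_error (msg : String) : String × String :=
  let s := PySem.Str.strip (if msg = "" then "" else msg)
  let sl := PySem.Str.lower s
  if PySem.Str.isIn "notfound" sl || PySem.Str.isIn "404" sl || PySem.Str.isIn "manifest unknown" sl then
    ("not_found", PySem.Str.slice s none (some 220))
  else if ["unauthorized", "authentication required", "denied", "forbidden", "no basic auth credentials"].any
      (fun x => PySem.Str.isIn x sl) then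
    ("auth", PySem.Str.slice s none (some 220))
  else if ["x509", "certificate", "tls handshake", "unknown authority"].any
      (fun x => PySem.Str.isIn x sl) then
    ("tls", PySem.Str.slice s none (some 220))
  else if ["i/o timeout", "context deadline", "no such host", "dial tcp", "connection refused", "timed out"].any
      (fun x => PySem.Str.isIn x sl) then
    ("network", PySem.Str.slice s none (some 220))
  else
    ("unknown", PySem.Str.slice s none (some 220))

-- ===== PORT B =====
def pvPriority : List (String × Nat) :=
  [ ("notfound", 0), ("404", 0), ("manifest unknown", 0),
    ("unauthorized", 1), ("authentication required", 1), ("denied", 1),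
    ("forbidden", 1), ("no basic auth credentials", 1),
    ("x509", 2), ("certificate", 2), ("tls handshake", 2), ("unknown authority", 2),
    ("i/o timeout", 3), ("context deadline", 3), ("no such host", 3),
    ("dial tcp", 3), ("connection refused", 3), ("timed out", 3) ]

def pvBuckets : List String := ["not_found", "auth", "tls", "network"]

def classify_pull_error_alt (msg : String) : String × String :=
  let s := PySem.Str.strip (if msg = "" then "" else msg)
  let sl := PySem.Str.lower s
  let hits := (pvPriority.filter (fun pq => PySem.Str.isIn pq.1 sl)).map Prod.snd
  let bucket :=
    match PySem.List.min? hits (fun x => x) with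
    | none => "unknown"
    | some k =>
        match PySem.List.pyGet? pvBuckets (k : Int) with  -- _BUCKETS[min(hits)]; k < 4 always
        | some b => b
        | none => ""
  (bucket, PySem.Str.slice s none (some 220))

-- ===== PRECONDITION & SPEC =====
def Spec_classify_pull_error (msg : String) (out : String × String) : Prop := out = classify_pull_error_alt msg
instance (msg : String) (out : String × String) : Decidable (Spec_classify_pull_error msg out) := by unfold Spec_classify_pull_error; infer_instance

-- ===== CLAIM (what is proved, stated in full; the proofs are below) =====
def Claim_equal_classify_pull_error : Prop := ∀ (msg : String), Dom_classify_pull_error msg → Spec_classify_pull_error msg (classify_pull_error msg)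

-- ===== LEMMAS AND PROOFS =====

-- the B-side hit list, parametrised by the string's match function
def pvHits (f : String → Bool) : List Nat :=
  (pvPriority.filter (fun pq => f pq.1)).map Prod.snd

lemma pvHits_mem (f : String → Bool) (x : Nat) :
    x ∈ pvHits f ↔ ∃ p, (p, x) ∈ pvPriority ∧ f p = true := by
  unfold pvHits
  simp [List.mem_map, List.mem_filter]

lemma pvMin?_eq (f : String → Bool) (k : Nat)
    (hin : k ∈ pvHits f) (hlow : ∀ x ∈ pvHits f, k ≤ x) :
    PySem.List.min? (pvHits f) (fun x => x) = some k := by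
  obtain ⟨m, hm⟩ : ∃ m, PySem.List.min? (pvHits f) (fun x => x) = some m := by
    rcases h : PySem.List.min? (pvHits f) (fun x => x) with _ | m
    · rw [PySem.List.min?_eq_none_iff] at h
      rw [h] at hin; simp at hin
    · exact ⟨m, rfl⟩
  have hmmem := PySem.List.min?_mem hm
  have hmle := PySem.List.min?_isMin hm k hin
  have h2 := hlow m hmmem
  simp only at hmle
  have : m = k := by omega
  rw [hm, this]

lemma pvKey (f : String → Bool) (snip : String) :
    (if f "notfound" || f "404" || f "manifest unknown" then
      ("not_found", snip)
    else if ["unauthorized", "authentication required", "denied", "forbidden", "no basic auth credentials"].any f then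
      ("auth", snip)
    else if ["x509", "certificate", "tls handshake", "unknown authority"].any f then
      ("tls", snip)
    else if ["i/o timeout", "context deadline", "no such host", "dial tcp", "connection refused", "timed out"].any f then
      ("network", snip)
    else
      ("unknown", snip)) =
    ((match PySem.List.min? (pvHits f) (fun x => x) with
      | none => "unknown"
      | some k =>
          match PySem.List.pyGet? pvBuckets (k : Int) with
          | some b => b
          | none => ""), snip) := by
  split_ifs with h0 h1 h2 h3
  · -- not_found: 0 ∈ hits, 0 is the minimum of anything
    have hin : (0 : Nat) ∈ pvHits f := by
      rw [pvHits_mem]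
      rcases Bool.or_eq_true_iff.mp h0 with h | h
      · rcases Bool.or_eq_true_iff.mp h with h | h
        · exact ⟨"notfound", by simp [pvPriority], h⟩
        · exact ⟨"404", by simp [pvPriority], h⟩
      · exact ⟨"manifest unknown", by simp [pvPriority], h⟩
    rw [pvMin?_eq f 0 hin (fun x _ => Nat.zero_le x)]
    simp [pvBuckets, PySem.List.pyGet?, PySem.List.pyIdx?]
  · -- auth: 1 ∈ hits, everything in hits is ≥ 1 since no group-0 pattern matches
    simp only [Bool.or_eq_true_iff, not_or, List.any_eq_true] at h0 h1
    obtain ⟨p, hp, hfp⟩ := h1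
    have hin : (1 : Nat) ∈ pvHits f := by
      rw [pvHits_mem]
      refine ⟨p, ?_, hfp⟩
      fin_cases hp <;> simp [pvPriority]
    have hlow : ∀ x ∈ pvHits f, 1 ≤ x := by
      intro x hx
      rw [pvHits_mem] at hx
      obtain ⟨q, hq, hfq⟩ := hx
      simp [pvPriority] at hq
      rcases hq with ⟨hq, _⟩ | ⟨hq, _⟩ | ⟨hq, _⟩ | h <;>
        first
        | (subst hq; simp_all)
        | omega
    rw [pvMin?_eq f 1 hin hlow]
    simp [pvBuckets, PySem.List.pyGet?, PySem.List.pyIdx?]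
  · -- tls
    simp only [Bool.or_eq_true_iff, not_or, List.any_eq_true] at h0 h1 h2
    obtain ⟨p, hp, hfp⟩ := h2
    have hin : (2 : Nat) ∈ pvHits f := by
      rw [pvHits_mem]
      refine ⟨p, ?_, hfp⟩
      fin_cases hp <;> simp [pvPriority]
    have hlow : ∀ x ∈ pvHits f, 2 ≤ x := by
      intro x hx
      rw [pvHits_mem] at hx
      obtain ⟨q, hq, hfq⟩ := hx
      simp [pvPriority] at hq
      rcases hq with ⟨hq, _⟩ | ⟨hq, _⟩ | ⟨hq, _⟩ | ⟨hq, _⟩ | ⟨hq, _⟩ | ⟨hq, _⟩ | ⟨hq, _⟩ | ⟨hq, _⟩ | h <;>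
        first
        | (subst hq; simp_all)
        | omega
    rw [pvMin?_eq f 2 hin hlow]
    simp [pvBuckets, PySem.List.pyGet?, PySem.List.pyIdx?]
  · -- network
    simp only [Bool.or_eq_true_iff, not_or, List.any_eq_true] at h0 h1 h2 h3
    obtain ⟨p, hp, hfp⟩ := h3
    have hin : (3 : Nat) ∈ pvHits f := by
      rw [pvHits_mem]
      refine ⟨p, ?_, hfp⟩
      fin_cases hp <;> simp [pvPriority]
    have hlow : ∀ x ∈ pvHits f, 3 ≤ x := by
      intro x hx
      rw [pvHits_mem] at hx
      obtain ⟨q, hq, hfq⟩ := hx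
      simp [pvPriority] at hq
      rcases hq with ⟨hq, _⟩ | ⟨hq, _⟩ | ⟨hq, _⟩ | ⟨hq, _⟩ | ⟨hq, _⟩ | ⟨hq, _⟩ | ⟨hq, _⟩ | ⟨hq, _⟩ | ⟨hq, _⟩ | ⟨hq, _⟩ | ⟨hq, _⟩ | ⟨hq, _⟩ | h <;>
        first
        | (subst hq; simp_all)
        | omega
    rw [pvMin?_eq f 3 hin hlow]
    simp [pvBuckets, PySem.List.pyGet?, PySem.List.pyIdx?]
  · -- unknown: no pattern at all matches, so the hit list is empty
    simp only [Bool.or_eq_true_iff, not_or, List.any_eq_true] at h0 h1 h2 h3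
    have hnil : pvHits f = [] := by
      unfold pvHits
      rw [List.map_eq_nil_iff, List.filter_eq_nil_iff]
      intro pq hpq
      obtain ⟨p, n⟩ := pq
      simp [pvPriority] at hpq
      rcases hpq with ⟨rfl, rfl⟩ | ⟨rfl, rfl⟩ | ⟨rfl, rfl⟩ | ⟨rfl, rfl⟩ | ⟨rfl, rfl⟩ | ⟨rfl, rfl⟩ | ⟨rfl, rfl⟩ | ⟨rfl, rfl⟩ | ⟨rfl, rfl⟩ | ⟨rfl, rfl⟩ | ⟨rfl, rfl⟩ | ⟨rfl, rfl⟩ | ⟨rfl, rfl⟩ | ⟨rfl, rfl⟩ | ⟨rfl, rfl⟩ | ⟨rfl, rfl⟩ | ⟨rfl, rfl⟩ | ⟨rfl, rfl⟩ <;>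
        simp_all
    rw [hnil]
    simp [PySem.List.min?]

-- ===== VERDICT (by name: the statement is the Claim_ definition above) =====
theorem classify_pull_error_spec : Claim_equal_classify_pull_error := by
  intro msg _
  unfold Spec_classify_pull_error classify_pull_error classify_pull_error_alt
  have := pvKey (fun p => PySem.Str.isIn p (PySem.Str.lower (PySem.Str.strip (if msg = "" then "" else msg))))
      (PySem.Str.slice (PySem.Str.strip (if msg = "" then "" else msg)) none (some 220))
  simpa [pvHits] using this
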